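-- pv_equiv track=rewrite | github.com/debuggeek/Brace-Tracker | brace_tracker/io.py | _strip_leading_blank_lines
-- ===== SOURCE A (Python) =====
-- from typing import Iterable, Iterator, List
--
-- def _strip_leading_blank_lines(handle: Iterable[str]) -> Iterator[str]:
--     """Yield CSV lines after skipping an optional blank header row."""
--
--     iterator = iter(handle)
--     for line in iterator:
--         if line.strip():
--             yield line
--             break
--     else:
--         return
--
--     for line in iterator:
--         yield line
-- ===== SOURCE B (Python) =====
-- from typing import Iterable, Iterator
--
-- def _strip_leading_blank_lines(handle: Iterable[str]) -> Iterator[str]: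
--     """Yield CSV lines after skipping an optional blank header row."""
--     lines = list(handle)
--     start = next((i for i, line in enumerate(lines) if line.strip()), len(lines))
--     yield from lines[start:]
-- ===== Notes on version B (the rewrite author's own statement) =====
-- stated objective: alternative
-- what changed: Instead of A's two-loop lazy generator (skip-then-yield with for-else/break), B materializes the input, computes the index of the first non-blank line via enumerate, and returns an iterator over the slice from that index.
import Mathlib
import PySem

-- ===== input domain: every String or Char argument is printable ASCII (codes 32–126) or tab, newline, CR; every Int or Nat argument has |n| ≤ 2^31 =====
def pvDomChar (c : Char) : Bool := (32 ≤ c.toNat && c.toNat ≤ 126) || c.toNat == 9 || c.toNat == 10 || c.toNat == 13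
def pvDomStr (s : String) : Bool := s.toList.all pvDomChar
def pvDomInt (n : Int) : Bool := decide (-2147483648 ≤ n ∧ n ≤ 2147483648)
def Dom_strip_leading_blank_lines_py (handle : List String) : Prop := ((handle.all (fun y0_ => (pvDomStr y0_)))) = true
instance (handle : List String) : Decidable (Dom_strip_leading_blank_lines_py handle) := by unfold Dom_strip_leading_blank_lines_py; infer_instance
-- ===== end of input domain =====

-- B replaces A's two-loop generator with index-of-first-non-blank (enumerate) + slice; equivalence is about the
-- returned line sequence (B materializes the input eagerly where A is lazy).


-- ===== PORT A =====
-- first loop: skip lines whose strip() is falsy; on the first truthy one, yield it and break,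
-- then the second loop yields the remaining lines of the iterator.
def strip_leading_blank_lines_py (handle : List String) : List String :=
  match handle with
  | [] => []
  | line :: rest =>
    if PySem.Str.strip line ≠ "" then line :: rest
    else strip_leading_blank_lines_py rest

-- ===== PORT B =====
-- start = next((i for i, line in enumerate(lines) if line.strip()), len(lines)); return lines[start:]
def strip_leading_blank_lines_py_alt (handle : List String) : List String :=
  let start : Int :=
    match (PySem.List.enumerate handle).find? (fun p => PySem.Str.strip p.2 != "") with
    | some p => p.1
    | none => (handle.length : Int)
  PySem.List.slice handle (some start) none

-- ===== PRECONDITION & SPEC =====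
def Spec_strip_leading_blank_lines_py (handle : List String) (out : List String) : Prop := out = strip_leading_blank_lines_py_alt handle
instance (handle : List String) (out : List String) : Decidable (Spec_strip_leading_blank_lines_py handle out) := by unfold Spec_strip_leading_blank_lines_py; infer_instance

-- ===== CLAIM (what is proved, stated in full; the proofs are below) =====
def Claim_equal_strip_leading_blank_lines_py : Prop := ∀ (handle : List String), Dom_strip_leading_blank_lines_py handle → Spec_strip_leading_blank_lines_py handle (strip_leading_blank_lines_py handle)

-- ===== LEMMAS AND PROOFS =====

-- the first index found by B's enumerate-search, as a shift of findIdx? on the bare list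
theorem pv_find_enum_fst (xs : List String) (s : Int) :
    ((PySem.List.enumerate xs s).find? (fun p => PySem.Str.strip p.2 != "")).map (·.1)
      = (xs.findIdx? (fun l => PySem.Str.strip l != "")).map (fun k => s + (k : Int)) := by
  induction xs generalizing s with
  | nil => simp [PySem.List.enumerate_nil]
  | cons x xs ih =>
    rw [PySem.List.enumerate_cons, List.find?_cons, List.findIdx?_cons]
    by_cases h : (PySem.Str.strip x != "") = true
    · simp [h]
    · simp only [h, Bool.false_eq_true, if_false]
      rw [ih (s + 1)]
      cases xs.findIdx? (fun l => PySem.Str.strip l != "") with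
      | none => simp
      | some k => simp; ring

-- ===== VERDICT (by name: the statement is the Claim_ definition above) =====
theorem strip_leading_blank_lines_py_spec : Claim_equal_strip_leading_blank_lines_py := by
  intro handle hdom
  clear hdom
  unfold Spec_strip_leading_blank_lines_py strip_leading_blank_lines_py_alt
  induction handle with
  | nil => rfl
  | cons line rest ih =>
    simp only [strip_leading_blank_lines_py]
    by_cases h : PySem.Str.strip line = ""
    · simp only [h, ne_eq, not_true_eq_false, if_false]
      rw [PySem.List.enumerate_cons, List.find?_cons]
      simp only [h, bne_self_eq_false, if_false,
        show (0 : Int) + 1 = 1 from by norm_num]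
      rw [ih]
      have h0 := pv_find_enum_fst rest 0
      have h1 := pv_find_enum_fst rest 1
      cases hk : rest.findIdx? (fun l => PySem.Str.strip l != "") with
      | none =>
        rw [hk] at h0 h1
        have hf0 : (PySem.List.enumerate rest 0).find? (fun p => PySem.Str.strip p.2 != "") = none := by
          cases hc : (PySem.List.enumerate rest 0).find? (fun p => PySem.Str.strip p.2 != "") with
          | none => rfl
          | some p => rw [hc] at h0; simp at h0
        have hf1 : (PySem.List.enumerate rest 1).find? (fun p => PySem.Str.strip p.2 != "") = none := by
          cases hc : (PySem.List.enumerate rest 1).find? (fun p => PySem.Str.strip p.2 != "") with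
          | none => rfl
          | some p => rw [hc] at h1; simp at h1
        rw [hf0, hf1]
        show PySem.List.slice rest (some (rest.length : Int))
          = PySem.List.slice (line :: rest) (some ((line :: rest).length : Int))
        have e : ((line :: rest).length : Int) = (((rest.length + 1 : Nat)) : Int) := by
          simp [List.length_cons]
        rw [e, PySem.List.slice_from_natCast, PySem.List.slice_from_natCast]
        simp [List.drop_length]
      | some k =>
        rw [hk] at h0 h1
        cases hf1 : (PySem.List.enumerate rest 1).find? (fun p => PySem.Str.strip p.2 != "") with
        | none => rw [hf1] at h1; simp at h1
        | some p =>
          rw [hf1] at h1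
          cases hf0 : (PySem.List.enumerate rest 0).find? (fun p => PySem.Str.strip p.2 != "") with
          | none => rw [hf0] at h0; simp at h0
          | some q =>
            rw [hf0] at h0
            simp at h0 h1
            show PySem.List.slice rest (some q.1) = PySem.List.slice (line :: rest) (some p.1)
            rw [h0, h1, show (1 : Int) + (k : Int) = (((k + 1 : Nat)) : Int) from by push_cast; ring,
              PySem.List.slice_from_natCast, PySem.List.slice_from_natCast]
            simp
    · simp only [ne_eq, h, not_false_eq_true, if_true]
      rw [PySem.List.enumerate_cons, List.find?_cons]
      have hb : (PySem.Str.strip line != "") = true := by simp [h]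
      simp only [hb, if_true]
      rw [show (0 : Int) = ((0 : Nat) : Int) from rfl, PySem.List.slice_from_natCast]
      simp
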